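-- pv_equiv track=rewrite | github.com/gbvsilva/codesignal-learn-codes | Path - Mastering Algorithms and Data Structures in Python/Course 3 - Linked Lists, Stacks, and Queues in Python/Unit 2 - Operating Stacks in Python/string_end.py | string_end
-- ===== SOURCE A (Python) =====
-- def string_end(strng, n):
--     stack = list(strng)
--     result = ''
--     # implement this
--     count = 0
--     while stack and count < n:
--         result += stack.pop()
--         count += 1
--     return result
-- ===== SOURCE B (Python) =====
-- def string_end(strng, n):
--     rev = strng[::-1]
--     return rev[:n] if n > 0 else ''
-- ===== Notes on version B (the rewrite author's own statement) =====
-- stated objective: simpler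
-- what changed: Replaces the stack-and-pop loop building the result by repeated string concatenation with a single full reversal and a slice of its first n characters (guarded by n > 0).
import Mathlib
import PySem

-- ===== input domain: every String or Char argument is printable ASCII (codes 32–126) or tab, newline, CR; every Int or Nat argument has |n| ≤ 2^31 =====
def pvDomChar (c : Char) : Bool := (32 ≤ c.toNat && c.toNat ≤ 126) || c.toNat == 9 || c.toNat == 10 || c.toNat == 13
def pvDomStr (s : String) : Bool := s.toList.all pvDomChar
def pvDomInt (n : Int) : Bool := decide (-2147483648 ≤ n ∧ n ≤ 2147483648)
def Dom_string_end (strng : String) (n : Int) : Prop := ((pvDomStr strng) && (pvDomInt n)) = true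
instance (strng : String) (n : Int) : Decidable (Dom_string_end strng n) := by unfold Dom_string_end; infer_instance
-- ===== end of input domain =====

-- B replaces A's stack-and-pop loop by one full reversal plus a slice of its first n chars (simpler).


-- ===== PORT A =====
-- the while loop: pop from the end of the stack while stack nonempty and count < n
def string_end_loop (stack : List Char) (result : String) (count : Int) (n : Int) : String :=
  if h : stack ≠ [] ∧ count < n then
    string_end_loop stack.dropLast (result ++ String.ofList [stack.getLast h.1]) (count + 1) n
  else result
termination_by stack.length
decreasing_by
  have h1 : stack.length ≠ 0 := fun hz => h.1 (List.length_eq_zero_iff.mp hz)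
  simp [List.length_dropLast]
  omega

def string_end (strng : String) (n : Int) : String :=
  string_end_loop strng.toList "" 0 n

-- ===== PORT B =====
def string_end_alt (strng : String) (n : Int) : String :=
  let rev := String.ofList strng.toList.reverse
  if 0 < n then String.ofList (rev.toList.take n.toNat) else ""

-- ===== PRECONDITION & SPEC =====
def Spec_string_end (strng : String) (n : Int) (out : String) : Prop := out = string_end_alt strng n
instance (strng : String) (n : Int) (out : String) : Decidable (Spec_string_end strng n out) := by unfold Spec_string_end; infer_instance

-- ===== CLAIM (what is proved, stated in full; the proofs are below) =====
def Claim_equal_string_end : Prop := ∀ (strng : String) (n : Int), Dom_string_end strng n → Spec_string_end strng n (string_end strng n)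

-- ===== LEMMAS AND PROOFS =====

theorem string_end_loop_eq (stack : List Char) (result : String) (count n : Int) :
    string_end_loop stack result count n
      = result ++ String.ofList (stack.reverse.take (n - count).toNat) := by
  induction hlen : stack.length using Nat.strong_induction_on generalizing stack result count with
  | _ k ih =>
    rw [string_end_loop]
    split
    · next h =>
      have hne := h.1
      have hlt := h.2
      have hlen' : stack.dropLast.length < k := by
        have h1 : stack.length ≠ 0 := fun hz => hne (List.length_eq_zero_iff.mp hz)
        have h2 : stack.dropLast.length = stack.length - 1 := List.length_dropLast
        omega
      rw [ih _ hlen' _ _ _ rfl]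
      have hrev : stack.reverse = stack.getLast hne :: stack.dropLast.reverse := by
        conv_lhs => rw [← List.dropLast_concat_getLast hne]
        simp
      have htn : (n - count).toNat = (n - (count + 1)).toNat + 1 := by omega
      rw [hrev, htn, List.take_succ_cons, String.append_assoc, ← String.ofList_append]
      rfl
    · next h =>
      rcases not_and_or.mp h with h1 | h2
      · have hnil : stack = [] := by tauto
        simp [hnil]
      · have h0 : (n - count).toNat = 0 := by omega
        simp [h0]

-- ===== VERDICT (by name: the statement is the Claim_ definition above) =====
theorem string_end_spec : Claim_equal_string_end := by
  intro strng n _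
  unfold Spec_string_end string_end string_end_alt
  rw [string_end_loop_eq]
  by_cases hn : 0 < n
  · simp [hn]
  · have h0 : (n - 0).toNat = 0 := by omega
    rw [h0]
    simp [hn]
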